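-- pv_equiv track=rewrite | github.com/pypi-data/pypi-mirror-235 | packages/bfgbidding/bfgbidding-0.0.19.tar.gz/bfgbidding-0.0.19/bfgbidding/src/player.py | _active_bid_history
-- ===== SOURCE A (Python) =====
-- def _active_bid_history(bid_history: list[str]) -> list[str]:
--     """Return the bid history without leading PASSES."""
--     temp_history = []
--     started = False
--     for bid in bid_history:
--         if bid != 'P' or started:
--             temp_history.append(bid)
--             started = True
--     return temp_history
-- ===== SOURCE B (Python) =====
-- def _active_bid_history(bid_history: list[str]) -> list[str]:
--     """Return the bid history without leading PASSES."""
--     index = len(bid_history)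
--     for i, bid in enumerate(bid_history):
--         if bid != 'P':
--             index = i
--             break
--     return bid_history[index:]
-- ===== Notes on version B (the rewrite author's own statement) =====
-- stated objective: simpler
-- what changed: Replaces the accumulator-plus-started-flag loop that appends every bid with a find-first-non-'P'-index scan followed by a single slice copy.
import Mathlib
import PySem

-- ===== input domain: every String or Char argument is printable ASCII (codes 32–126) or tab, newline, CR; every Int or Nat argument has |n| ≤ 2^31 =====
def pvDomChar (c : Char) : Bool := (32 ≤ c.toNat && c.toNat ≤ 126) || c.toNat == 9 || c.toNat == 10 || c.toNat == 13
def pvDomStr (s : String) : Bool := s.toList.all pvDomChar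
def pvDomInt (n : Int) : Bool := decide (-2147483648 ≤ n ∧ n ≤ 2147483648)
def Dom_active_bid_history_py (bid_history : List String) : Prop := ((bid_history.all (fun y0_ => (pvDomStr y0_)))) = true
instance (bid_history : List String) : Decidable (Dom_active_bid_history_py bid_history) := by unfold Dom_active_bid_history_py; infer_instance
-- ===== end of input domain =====

-- B replaces A's accumulator-plus-started-flag loop with a find-first-non-'P' index then one slice (simpler decomposition).

-- ===== PORT A =====
-- loop state: (temp_history, started)
def active_bid_history_py (bid_history : List String) : List String :=
  (bid_history.foldl
    (fun (st : List String × Bool) bid =>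
      if bid ≠ "P" ∨ st.2 then (st.1 ++ [bid], true) else st)
    ([], false)).1

-- ===== PORT B =====
-- index of the first element ≠ "P" (defaults to the length), as in Source B's enumerate-and-break loop
def pvFirstNonP (l : List String) : Nat :=
  match l with
  | [] => 0
  | bid :: rest => if bid = "P" then 1 + pvFirstNonP rest else 0

def active_bid_history_py_alt (bid_history : List String) : List String :=
  PySem.List.slice bid_history ((pvFirstNonP bid_history : Int)) (bid_history.length : Int)

-- ===== PRECONDITION & SPEC =====
def Spec_active_bid_history_py (bid_history : List String) (out : List String) : Prop := out = active_bid_history_py_alt bid_history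
instance (bid_history : List String) (out : List String) : Decidable (Spec_active_bid_history_py bid_history out) := by unfold Spec_active_bid_history_py; infer_instance

-- ===== CLAIM (what is proved, stated in full; the proofs are below) =====
def Claim_equal_active_bid_history_py : Prop := ∀ (bid_history : List String), Dom_active_bid_history_py bid_history → Spec_active_bid_history_py bid_history (active_bid_history_py bid_history)

-- ===== LEMMAS AND PROOFS =====

-- once started, A's loop appends every remaining bid
theorem pv_foldl_started (l t : List String) :
    (l.foldl (fun (st : List String × Bool) bid =>
      if bid ≠ "P" ∨ st.2 then (st.1 ++ [bid], true) else st) (t, true)) = (t ++ l, true) := by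
  induction l generalizing t with
  | nil => simp
  | cons b rest ih => simp [List.foldl_cons, ih]

theorem pv_slice_eq_drop (l : List String) (k : Nat) :
    PySem.List.slice l (k : Int) (l.length : Int) = l.drop k := by
  rw [PySem.List.slice_natCast]
  exact List.take_of_length_le (by simp)

theorem pv_eq_drop (l : List String) :
    active_bid_history_py l = l.drop (pvFirstNonP l) := by
  induction l with
  | nil => simp [active_bid_history_py, pvFirstNonP]
  | cons b rest ih =>
    by_cases hb : b = "P"
    · rw [pvFirstNonP, if_pos hb, Nat.add_comm, List.drop_succ_cons]
      simpa [active_bid_history_py, hb] using ih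
    · simp [active_bid_history_py, pvFirstNonP, hb, pv_foldl_started]

-- ===== VERDICT (by name: the statement is the Claim_ definition above) =====
theorem active_bid_history_py_spec : Claim_equal_active_bid_history_py := by
  intro l _
  unfold Spec_active_bid_history_py active_bid_history_py_alt
  rw [pv_eq_drop]
  exact (pv_slice_eq_drop l (pvFirstNonP l)).symm
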